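-- pv_equiv track=rewrite | github.com/EricvanSchaik/Module7 | test.py | cutter
-- ===== SOURCE A (Python) =====
-- def cutter(lengths, log):
--     n = len(lengths) - 1 # The amount of lengths
--     matrix = [[0 for l in range(log + 1)] for i in range(n + 2)]
--
--     for l in range(0, log + 1):
--         matrix[0][l] = l
--
--     for i in range(1, n + 2):
--         for l in range(0, log + 1):
--             if l - lengths[i - 1] < 0:
--                 matrix[i][l] = matrix[i-1][l]
--             else:
--                 matrix[i][l] = min(matrix[i - 1][l], matrix[i - 1][l - lengths[i - 1]])
--
--     return matrix[n + 1][log]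
-- ===== SOURCE B (Python) =====
-- def cutter(lengths, log):
--     # Reachable subset sums <= log; the waste is log minus the largest one.
--     reachable = {0}
--     for length in lengths:
--         reachable |= {s + length for s in reachable if s + length <= log}
--     return log - max(reachable)
-- ===== Notes on version B (the rewrite author's own statement) =====
-- stated objective: faster
-- what changed: Replaces the (len+1) x (log+1) min-waste DP table with a single pass maintaining the set of reachable subset sums capped at log, returning log minus its maximum.
import Mathlib
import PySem

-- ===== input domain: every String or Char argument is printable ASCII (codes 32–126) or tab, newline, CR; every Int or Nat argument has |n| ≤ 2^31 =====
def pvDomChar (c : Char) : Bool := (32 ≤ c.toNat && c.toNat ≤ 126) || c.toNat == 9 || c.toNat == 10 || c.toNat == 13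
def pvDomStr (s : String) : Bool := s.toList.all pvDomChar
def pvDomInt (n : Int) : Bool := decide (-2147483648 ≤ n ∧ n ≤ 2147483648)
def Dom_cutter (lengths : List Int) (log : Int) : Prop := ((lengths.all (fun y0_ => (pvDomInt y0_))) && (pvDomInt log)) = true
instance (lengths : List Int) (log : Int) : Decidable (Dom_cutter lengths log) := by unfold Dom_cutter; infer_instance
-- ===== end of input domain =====

-- B replaces A's 2D min-waste DP table with one pass over a set of reachable subset sums capped at log.

-- ===== PORT A =====
-- one DP row: matrix[i][l] for l in range(0, log+1), computed from the previous row and length x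
def cutterRow (log : Int) (prev : List Int) (x : Int) : List Int :=
  (PySem.List.pyRange 0 (log + 1)).map (fun l =>
    if l - x < 0 then PySem.List.pyGetD prev l 0
    else min (PySem.List.pyGetD prev l 0) (PySem.List.pyGetD prev (l - x) 0))

def cutter (lengths : List Int) (log : Int) : Int :=
  let n : Int := (lengths.length : Int) - 1
  -- matrix[0][l] = l (the zero-initialised row is fully overwritten)
  let row0 : List Int := PySem.List.pyRange 0 (log + 1)
  -- for i in range(1, n+2): matrix[i] is filled column by column from matrix[i-1] and lengths[i-1]
  let matrix : List (List Int) :=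
    (PySem.List.pyRange 1 (n + 2)).foldl
      (fun m i => m ++ [cutterRow log (PySem.List.pyGetD m (i - 1) []) (PySem.List.pyGetD lengths (i - 1) 0)])
      [row0]
  PySem.List.pyGetD (PySem.List.pyGetD matrix (n + 1) []) log 0

-- ===== PORT B =====
def cutter_alt (lengths : List Int) (log : Int) : Int :=
  let reachable : PySem.Set Int :=
    lengths.foldl
      (fun r x => PySem.Set.union r (PySem.Set.ofList ((r.filter (fun s => decide (s + x ≤ log))).map (fun s => s + x))))
      (PySem.Set.ofList [0])
  log - (PySem.List.max? reachable (fun y => y)).getD 0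

-- ===== PRECONDITION & SPEC =====
-- A raises IndexError whenever log < 0 (the rows are shorter than index log) or some length is negative
-- (the column index l - lengths[i-1] exceeds log); Pre_ admits exactly the inputs on which A returns.
def Pre_cutter (lengths : List Int) (log : Int) : Prop := 0 ≤ log ∧ ∀ x ∈ lengths, 0 ≤ x
instance (lengths : List Int) (log : Int) : Decidable (Pre_cutter lengths log) := by unfold Pre_cutter; infer_instance
def pvWitness_cutter : List Int × Int := ([2, 3, 7], 10)
def Spec_cutter (lengths : List Int) (log : Int) (out : Int) : Prop := out = cutter_alt lengths log
instance (lengths : List Int) (log : Int) (out : Int) : Decidable (Spec_cutter lengths log out) := by unfold Spec_cutter; infer_instance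

-- ===== CLAIM (what is proved, stated in full; the proofs are below) =====
def Claim_equal_cutter : Prop := ∀ (lengths : List Int) (log : Int), Dom_cutter lengths log → Pre_cutter lengths log → Spec_cutter lengths log (cutter lengths log)

-- ===== LEMMAS AND PROOFS =====

-- B's per-length step on the reachable-sums set (proof-only abbreviation)
def stepB (log : Int) (r : PySem.Set Int) (x : Int) : PySem.Set Int :=
  PySem.Set.union r (PySem.Set.ofList ((r.filter (fun s => decide (s + x ≤ log))).map (fun s => s + x)))

-- largest element of r that is ≤ c (0 if none; r always contains 0 where we use it)
def maxle (r : List Int) (c : Int) : Int := (r.filter (fun s => decide (s ≤ c))).foldl max 0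

lemma le_maxle (r : List Int) (c s : Int) (hs : s ∈ r) (hsc : s ≤ c) : s ≤ maxle r c := by
  refine (PySem.List.le_foldl_max _ 0).2 s ?_
  simp [List.mem_filter, hs, hsc]

lemma maxle_mem_le (r : List Int) (c : Int) (h0 : 0 ∈ r) (hc : 0 ≤ c) :
    maxle r c ∈ r ∧ maxle r c ≤ c := by
  have hmem : (0 : Int) ∈ r.filter (fun s => decide (s ≤ c)) := by
    simp [List.mem_filter, h0, hc]
  rcases PySem.List.foldl_max_mem (r.filter (fun s => decide (s ≤ c))) 0 with h | h
  · rw [maxle, h]; exact ⟨h0, hc⟩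
  · rw [maxle] at *
    rcases List.mem_filter.mp h with ⟨h1, h2⟩
    exact ⟨h1, by simpa using h2⟩

lemma mem_stepB (log x y : Int) (r : PySem.Set Int) :
    y ∈ stepB log r x ↔ y ∈ r ∨ ∃ s ∈ r, s + x ≤ log ∧ y = s + x := by
  unfold stepB
  rw [PySem.Set.mem_union, PySem.Set.mem_ofList]
  simp [List.mem_filter]
  constructor
  · rintro (h | ⟨s, ⟨hs, hsx⟩, rfl⟩)
    · exact Or.inl h
    · exact Or.inr ⟨s, hs, hsx, rfl⟩
  · rintro (h | ⟨s, hs, hsx, rfl⟩)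
    · exact Or.inl h
    · exact Or.inr ⟨s, ⟨hs, hsx⟩, rfl⟩

lemma maxle_stepB (log x c : Int) (r : PySem.Set Int)
    (h0 : 0 ∈ r) (hnn : ∀ s ∈ r, 0 ≤ s ∧ s ≤ log) (_hx : 0 ≤ x)
    (hc : 0 ≤ c) (hcl : c ≤ log) :
    maxle (stepB log r x) c =
      if c - x < 0 then maxle r c else max (maxle r c) (x + maxle r (c - x)) := by
  have h0' : (0 : Int) ∈ stepB log r x := (mem_stepB log x 0 r).mpr (Or.inl h0)
  obtain ⟨hm_mem, hm_le⟩ := maxle_mem_le (stepB log r x) c h0' hc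
  split_ifs with hcx
  · -- x > c: the new sums s+x all exceed c, so the best ≤ c is unchanged
    apply le_antisymm
    · rcases (mem_stepB log x _ r).mp hm_mem with h | ⟨s, hs, hsx, heq⟩
      · exact le_maxle r c _ h hm_le
      · exfalso; have := (hnn s hs).1; omega
    · obtain ⟨h1, h2⟩ := maxle_mem_le r c h0 hc
      exact le_maxle _ c _ ((mem_stepB log x _ r).mpr (Or.inl h1)) h2
  · -- x ≤ c
    apply le_antisymm
    · rcases (mem_stepB log x _ r).mp hm_mem with h | ⟨s, hs, hsx, heq⟩
      · exact le_trans (le_maxle r c _ h hm_le) (le_max_left _ _)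
      · have hs' : s ≤ c - x := by omega
        have := le_maxle r (c - x) s hs hs'
        have : maxle (stepB log r x) c ≤ x + maxle r (c - x) := by omega
        exact le_trans this (le_max_right _ _)
    · apply max_le
      · obtain ⟨h1, h2⟩ := maxle_mem_le r c h0 hc
        exact le_maxle _ c _ ((mem_stepB log x _ r).mpr (Or.inl h1)) h2
      · obtain ⟨h1, h2⟩ := maxle_mem_le r (c - x) h0 (by omega)
        have hin : x + maxle r (c - x) ∈ stepB log r x := by
          refine (mem_stepB log x _ r).mpr (Or.inr ⟨maxle r (c - x), h1, by omega, by ring⟩)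
        exact le_maxle _ c _ hin (by omega)

-- reading a freshly written DP row at a valid column
lemma row_getD (log : Int) (prev : List Int) (x c : Int) (hc : 0 ≤ c) (hcl : c ≤ log) :
    PySem.List.pyGetD (cutterRow log prev x) c 0 =
      if c - x < 0 then PySem.List.pyGetD prev c 0
      else min (PySem.List.pyGetD prev c 0) (PySem.List.pyGetD prev (c - x) 0) := by
  have hn : ((log + 1).toNat : Int) = log + 1 := by omega
  have hk : ((c.toNat : Nat) : Int) = c := by omega
  rw [cutterRow, ← hn, ← hk,
    PySem.List.pyGetD_map_pyRange _ (log + 1).toNat c.toNat 0 (by omega)]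

-- the loop invariant: the current DP row tabulates c - maxle r c for B's current reachable set r
def CInv (log : Int) (prev : List Int) (r : PySem.Set Int) : Prop :=
  0 ∈ r ∧ (∀ s ∈ r, 0 ≤ s ∧ s ≤ log) ∧
  (∀ c : Int, 0 ≤ c → c ≤ log → PySem.List.pyGetD prev c 0 = c - maxle r c)

lemma inv_step (log x : Int) (prev : List Int) (r : PySem.Set Int)
    (hx : 0 ≤ x) (h : CInv log prev r) : CInv log (cutterRow log prev x) (stepB log r x) := by
  obtain ⟨h0, hnn, hrow⟩ := h
  refine ⟨(mem_stepB log x 0 r).mpr (Or.inl h0), ?_, ?_⟩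
  · intro s hs
    rcases (mem_stepB log x s r).mp hs with hsr | ⟨t, ht, htx, rfl⟩
    · exact hnn s hsr
    · have := (hnn t ht).1; omega
  · intro c hc hcl
    rw [row_getD log prev x c hc hcl, maxle_stepB log x c r h0 hnn hx hc hcl]
    split_ifs with hcx
    · exact hrow c hc hcl
    · rw [hrow c hc hcl, hrow (c - x) (by omega) (by omega)]
      omega

lemma inv_fold (log : Int) (xs : List Int) (hxs : ∀ x ∈ xs, 0 ≤ x) :
    ∀ (prev : List Int) (r : PySem.Set Int), CInv log prev r →
      CInv log (xs.foldl (fun p x => cutterRow log p x) prev) (xs.foldl (stepB log) r) := by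
  induction xs with
  | nil => intro prev r h; exact h
  | cons x xs ih =>
    intro prev r h
    exact ih (fun y hy => hxs y (List.mem_cons_of_mem x hy)) _ _
      (inv_step log x prev r (hxs x (List.mem_cons_self)) h)

lemma inv_init (log : Int) (hl : 0 ≤ log) :
    CInv log (PySem.List.pyRange 0 (log + 1)) (PySem.Set.ofList [0]) := by
  refine ⟨by simp [PySem.Set.mem_ofList], by simp [PySem.Set.mem_ofList]; omega, ?_⟩
  intro c hc hcl
  have hmax : maxle (PySem.Set.ofList [0]) c = 0 := by
    show (([(0:Int)]).filter (fun s => decide (s ≤ c))).foldl max 0 = 0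
    simp [hc]
  have hn : ((log + 1).toNat : Int) = log + 1 := by omega
  have hk : ((c.toNat : Nat) : Int) = c := by omega
  rw [hmax, ← hn, PySem.List.pyRange_zero_natCast, ← hk,
    PySem.List.pyGetD_natCast, PySem.List.getD_map_range _ _ _ _ (by omega)]
  omega

-- A's matrix loop: the fold over range(1, n+2) appends one row per length; its last row is
-- the plain left fold of cutterRow over lengths.
lemma matrix_loop (log : Int) (full : List Int) (ys : List Int) :
    ∀ (pre : List Int) (m : List (List Int)) (b : List Int),
      full = pre ++ ys → m.length = pre.length + 1 →
      PySem.List.pyGetD m (pre.length : Int) [] = b →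
      PySem.List.pyGetD
        ((PySem.List.pyRange ((pre.length : Int) + 1) ((full.length : Int) + 1)).foldl
          (fun m i => m ++ [cutterRow log (PySem.List.pyGetD m (i - 1) [])
                              (PySem.List.pyGetD full (i - 1) 0)]) m)
        ((full.length : Int)) []
      = ys.foldl (fun p x => cutterRow log p x) b := by
  induction ys with
  | nil =>
    intro pre m b hfull hlen hb
    subst hfull
    simp only [List.append_nil] at *
    rw [PySem.List.pyRange_one_eq_nil (by omega), List.foldl_nil, hb, List.foldl_nil]
  | cons x ys ih =>
    intro pre m b hfull hlen hb
    have hlen2 : full.length = pre.length + ys.length + 1 := by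
      rw [hfull, List.length_append, List.length_cons]; omega
    have hlt : ((pre.length : Int) + 1) < (full.length : Int) + 1 := by omega
    rw [PySem.List.pyRange_one_cons hlt, List.foldl_cons]
    have hx : PySem.List.pyGetD full ((pre.length : Int) + 1 - 1) 0 = x := by
      subst hfull
      have : ((pre.length : Int) + 1 - 1) = (pre.length : Int) := by ring
      rw [this, PySem.List.pyGetD_natCast, List.getD_eq_getElem?_getD]
      simp
    have hb' : PySem.List.pyGetD m ((pre.length : Int) + 1 - 1) [] = b := by
      have : ((pre.length : Int) + 1 - 1) = (pre.length : Int) := by ring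
      rw [this, hb]
    rw [hx, hb']
    have hfull' : full = (pre ++ [x]) ++ ys := by simp [hfull]
    have hcast : ((pre ++ [x]).length : Int) = (pre.length : Int) + 1 := by simp
    have := ih (pre ++ [x]) (m ++ [cutterRow log b x]) (cutterRow log b x)
      hfull' (by simp [hlen]) ?_
    · rw [← hcast, this, List.foldl_cons]
    · rw [hcast] at *
      rw [PySem.List.pyGetD_of_nonneg _ _ (by omega)]
      have : ((pre.length : Int) + 1).toNat = m.length := by omega
      rw [this, List.getD_eq_getElem?_getD]
      simp

-- A equals the row-by-row fold read at column log
lemma cutter_eq_fold (lengths : List Int) (log : Int) :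
    cutter lengths log =
      PySem.List.pyGetD
        (lengths.foldl (fun p x => cutterRow log p x) (PySem.List.pyRange 0 (log + 1)))
        log 0 := by
  simp only [cutter]
  have h1 : ((lengths.length : Int) - 1 + 2) = (lengths.length : Int) + 1 := by ring
  have h2 : ((lengths.length : Int) - 1 + 1) = (lengths.length : Int) := by ring
  rw [h1, h2]
  have := matrix_loop log lengths lengths [] [PySem.List.pyRange 0 (log + 1)]
    (PySem.List.pyRange 0 (log + 1)) (by simp) (by simp)
    (by rw [show ((List.length ([] : List Int)) : Int) = 0 from by simp]; rfl)
  simpa using congrArg (fun row => PySem.List.pyGetD row log 0) this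

-- B's maximum is maxle at cap log
lemma max_eq_maxle (log : Int) (r : PySem.Set Int) (h0 : 0 ∈ r)
    (hnn : ∀ s ∈ r, 0 ≤ s ∧ s ≤ log) (hl : 0 ≤ log) :
    (PySem.List.max? r (fun y => y)).getD 0 = maxle r log := by
  cases hm : PySem.List.max? r (fun y => y) with
  | none =>
    have : r = [] := (PySem.List.max?_eq_none_iff r (fun y => y)).mp hm
    rw [this] at h0; cases h0
  | some m =>
    have hmem := PySem.List.max?_mem hm
    have hmax := PySem.List.max?_isMax hm
    obtain ⟨h1, h2⟩ := maxle_mem_le r log h0 hl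
    simp only [Option.getD_some]
    exact le_antisymm (le_maxle r log m hmem (hnn m hmem).2) (hmax _ h1)

-- ===== VERDICT (by name: the statement is the Claim_ definition above) =====
theorem cutter_spec : Claim_equal_cutter := by
  intro lengths log _ hpre
  obtain ⟨hl, hxs⟩ := hpre
  unfold Spec_cutter
  simp only [cutter_alt]
  rw [cutter_eq_fold]
  have hinv := inv_fold log lengths hxs _ _ (inv_init log hl)
  obtain ⟨h0, hnn, hrow⟩ := hinv
  rw [hrow log hl (le_refl log)]
  have : (lengths.foldl (stepB log) (PySem.Set.ofList [0])) =
      lengths.foldl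
        (fun r x => PySem.Set.union r (PySem.Set.ofList ((r.filter (fun s => decide (s + x ≤ log))).map (fun s => s + x))))
        (PySem.Set.ofList [0]) := rfl
  rw [← this, max_eq_maxle log _ h0 hnn hl]
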